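-- pv_equiv track=rewrite | github.com/kjbrak/AoC_2022 | day6/day6.py | find_markers
-- ===== SOURCE A (Python) =====
-- def find_markers(data, sig_len):
--     markers = []
--     for i,s in enumerate(data):
--         if i>=sig_len-1:
--             sample = data[i-(sig_len-1):i+1]
--             if len(set(sample)) == len(sample):
--                 markers.append(i+1) # 1-indexed
--     return markers
-- ===== SOURCE B (Python) =====
-- def find_markers(data, sig_len):
--     # Sliding "barrier" scan: barrier is the largest left index of any duplicate
--     # pair seen so far; the window ending at i is all-distinct iff i - barrier >= sig_len.
--     n = len(data)
--     if sig_len <= 1: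
--         # every window of length <= 1 (including empty windows) is duplicate-free
--         return list(range(1, n + 1))
--     markers = []
--     last = {}
--     barrier = -1
--     for i, c in enumerate(data):
--         j = last.get(c, -1)
--         if j > barrier:
--             barrier = j
--         last[c] = i
--         if i - barrier >= sig_len:
--             markers.append(i + 1)
--     return markers
-- ===== Notes on version B (the rewrite author's own statement) =====
-- stated objective: faster
-- what changed: Replaces the per-position slice-and-set distinctness test (O(n*sig_len)) by a single left-to-right scan keeping each character's last occurrence and a 'barrier' (the rightmost left index of any duplicate pair), so a window is distinct iff i - barrier >= sig_len.
import Mathlib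
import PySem

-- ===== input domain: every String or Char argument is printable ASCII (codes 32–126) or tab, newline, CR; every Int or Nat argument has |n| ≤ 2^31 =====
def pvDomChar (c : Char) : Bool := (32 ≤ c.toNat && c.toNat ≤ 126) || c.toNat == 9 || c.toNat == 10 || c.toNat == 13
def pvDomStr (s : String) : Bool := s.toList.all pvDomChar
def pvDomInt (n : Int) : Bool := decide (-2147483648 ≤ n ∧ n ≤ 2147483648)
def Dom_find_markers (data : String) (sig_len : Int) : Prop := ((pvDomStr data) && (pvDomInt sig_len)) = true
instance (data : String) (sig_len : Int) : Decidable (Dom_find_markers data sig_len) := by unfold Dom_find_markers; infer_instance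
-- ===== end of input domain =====

-- B replaces A's per-position slice + set distinctness test by a one-pass scan of last
-- occurrences with a duplicate 'barrier'; return values proved equal on all inputs.

-- ===== PORT A =====
def find_markers (data : String) (sig_len : Int) : List Int :=
  (PySem.List.enumerate data.toList 0).foldl
    (fun markers p =>
      if sig_len - 1 ≤ p.1 then
        let sample := PySem.List.slice data.toList (some (p.1 - (sig_len - 1))) (some (p.1 + 1))
        if (PySem.Set.ofList sample).length = sample.length then markers ++ [p.1 + 1]
        else markers
      else markers)
    []

-- ===== PORT B =====
def find_markers_alt (data : String) (sig_len : Int) : List Int :=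
  let n := data.toList.length
  if sig_len ≤ 1 then
    PySem.List.pyRange 1 ((n : Int) + 1) 1
  else
    (((PySem.List.enumerate data.toList 0).foldl
      (fun (st : PySem.Dict Char Int × Int × List Int) p =>
        let j := st.1.getD p.2 (-1)
        let barrier := if j > st.2.1 then j else st.2.1
        let last := st.1.insert p.2 p.1
        let markers := if sig_len ≤ p.1 - barrier then st.2.2 ++ [p.1 + 1] else st.2.2
        (last, barrier, markers))
      (PySem.Dict.empty, -1, [])) : PySem.Dict Char Int × Int × List Int).2.2

-- ===== PRECONDITION & SPEC =====
def Spec_find_markers (data : String) (sig_len : Int) (out : List Int) : Prop := out = find_markers_alt data sig_len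
instance (data : String) (sig_len : Int) (out : List Int) : Decidable (Spec_find_markers data sig_len out) := by unfold Spec_find_markers; infer_instance

-- ===== CLAIM (what is proved, stated in full; the proofs are below) =====
def Claim_equal_find_markers : Prop := ∀ (data : String) (sig_len : Int), Dom_find_markers data sig_len → Spec_find_markers data sig_len (find_markers data sig_len)

-- ===== LEMMAS AND PROOFS =====

-- index of the last occurrence of c among l[0..m), as Python's -1-defaulted value
def lastIdx (l : List Char) : Nat → Char → Int
  | 0, _ => -1
  | m + 1, c => if l.getD m ' ' = c then (m : Int) else lastIdx l m c

-- largest left index of a duplicate pair inside l[0..m) (-1 if none)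
def bar (l : List Char) : Nat → Int
  | 0 => -1
  | m + 1 => max (bar l m) (lastIdx l m (l.getD m ' '))

def ref (l : List Char) (L : Int) : List Int :=
  (List.range' 0 l.length).flatMap
    (fun k => if bar l (k + 1) + L ≤ (k : Int) then [(k : Int) + 1] else [])

theorem neg_one_le_bar (l : List Char) (m : Nat) : -1 ≤ bar l m := by
  induction m with
  | zero => simp [bar]
  | succ m ih => simp only [bar]; exact le_max_of_le_left ih

theorem lastIdx_le_iff (l : List Char) (m : Nat) (c : Char) (B : Int) (hB : -1 ≤ B) :
    lastIdx l m c ≤ B ↔ ∀ j, j < m → l.getD j ' ' = c → (j : Int) ≤ B := by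
  induction m with
  | zero => simp [lastIdx, hB]
  | succ m ih =>
    simp only [lastIdx]
    split
    · rename_i hc0
      constructor
      · intro h j hj hc
        rcases Nat.lt_succ_iff_lt_or_eq.mp hj with hj' | rfl
        · have : (j : Int) < (m : Int) := by exact_mod_cast hj'
          omega
        · exact h
      · intro h
        exact h m (Nat.lt_succ_self m) hc0
    · rename_i hc0
      rw [ih]
      constructor
      · intro h j hj hc
        rcases Nat.lt_succ_iff_lt_or_eq.mp hj with hj' | rfl
        · exact h j hj' hc
        · exact absurd hc hc0
      · intro h j hj hc
        exact h j (Nat.lt_succ_of_lt hj) hc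

theorem bar_le_iff (l : List Char) (m : Nat) (B : Int) (hB : -1 ≤ B) :
    bar l m ≤ B ↔ ∀ j j', j < j' → j' < m → l.getD j ' ' = l.getD j' ' ' → (j : Int) ≤ B := by
  induction m with
  | zero => simp [bar, hB]
  | succ m ih =>
    simp only [bar, max_le_iff, ih, lastIdx_le_iff l m _ B hB]
    constructor
    · rintro ⟨h1, h2⟩ j j' hjj' hj' hc
      rcases Nat.lt_succ_iff_lt_or_eq.mp hj' with h | rfl
      · exact h1 j j' hjj' h hc
      · exact h2 j hjj' hc
    · intro h
      exact ⟨fun j j' hjj' hj' hc => h j j' hjj' (Nat.lt_succ_of_lt hj') hc,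
             fun j hj hc => h j m hj (Nat.lt_succ_self m) hc⟩


theorem setlen_iff (xs : List Char) : (PySem.Set.ofList xs).length = xs.length ↔ xs.Nodup := by
  constructor
  · intro h
    have h1 := PySem.Set.nodup_ofList xs
    have h2 : PySem.Set.ofList xs ⊆ xs := fun y hy => (PySem.Set.mem_ofList xs y).mp hy
    exact ((h1.subperm h2).perm_of_length_le (by omega)).nodup h1
  · intro h
    rw [PySem.Set.ofList_eq_self_of_nodup xs h]

theorem nodup_pairwise (w : List Char) :
    w.Nodup ↔ ∀ (i j : Nat) (_ : i < w.length) (_ : j < w.length), i < j → w[i] ≠ w[j] :=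
  List.pairwise_iff_getElem

theorem window_iff (l : List Char) (L : Int) (hL : 2 ≤ L) (k : Nat) (hk : k < l.length)
    (hLk : L - 1 ≤ (k : Int)) :
    bar l (k + 1) + L ≤ (k : Int) ↔
      (List.take L.toNat (List.drop (k + 1 - L.toNat) l)).Nodup := by
  have hcast : (L.toNat : Int) = L := Int.toNat_of_nonneg (by omega)
  have hB : -1 ≤ (k : Int) - L := by omega
  have hL' : L.toNat ≤ k + 1 := by omega
  have hlen : (List.take L.toNat (List.drop (k + 1 - L.toNat) l)).length = L.toNat := by
    simp only [List.length_take, List.length_drop]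
    omega
  rw [show bar l (k + 1) + L ≤ (k : Int) ↔ bar l (k + 1) ≤ (k : Int) - L by omega,
      bar_le_iff l (k + 1) _ hB, nodup_pairwise]
  constructor
  · intro h i j hi hj hij
    rw [hlen] at hi hj
    rw [List.getElem_take, List.getElem_drop, List.getElem_take, List.getElem_drop]
    intro heq
    have hji : k + 1 - L.toNat + i < l.length := by omega
    have hjj : k + 1 - L.toNat + j < l.length := by omega
    have := h (k + 1 - L.toNat + i) (k + 1 - L.toNat + j) (by omega) (by omega)
      (by rw [List.getD_eq_getElem l ' ' hji, List.getD_eq_getElem l ' ' hjj]; exact heq)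
    omega
  · intro h j j' hjj' hj' heq
    by_contra hcon
    push Not at hcon
    have hjl : j < l.length := by omega
    have hj'l : j' < l.length := by omega
    have haj : k + 1 - L.toNat ≤ j := by omega
    have hi1 : j - (k + 1 - L.toNat) < (List.take L.toNat (List.drop (k + 1 - L.toNat) l)).length := by
      rw [hlen]; omega
    have hi2 : j' - (k + 1 - L.toNat) < (List.take L.toNat (List.drop (k + 1 - L.toNat) l)).length := by
      rw [hlen]; omega
    apply h (j - (k + 1 - L.toNat)) (j' - (k + 1 - L.toNat)) hi1 hi2 (by omega)
    rw [List.getElem_take, List.getElem_drop, List.getElem_take, List.getElem_drop]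
    rw [List.getD_eq_getElem l ' ' hjl, List.getD_eq_getElem l ' ' hj'l] at heq
    have e1 : k + 1 - L.toNat + (j - (k + 1 - L.toNat)) = j := by omega
    have e2 : k + 1 - L.toNat + (j' - (k + 1 - L.toNat)) = j' := by omega
    simp only [e1, e2]
    exact heq


def bstep (L : Int) (st : PySem.Dict Char Int × Int × List Int) (p : Int × Char) :
    PySem.Dict Char Int × Int × List Int :=
  let j := st.1.getD p.2 (-1)
  let barrier := if j > st.2.1 then j else st.2.1
  let last := st.1.insert p.2 p.1
  let markers := if L ≤ p.1 - barrier then st.2.2 ++ [p.1 + 1] else st.2.2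
  (last, barrier, markers)

theorem Bloop (l : List Char) (L : Int) :
    ∀ (t : List Char) (m : Nat), l.drop m = t →
      ∀ (last : PySem.Dict Char Int) (barrier : Int) (acc : List Int),
      (∀ c, last.getD c (-1) = lastIdx l m c) → barrier = bar l m →
      ((PySem.List.enumerate t (m : Int)).foldl (bstep L) (last, barrier, acc)).2.2
      = acc ++ (List.range' m t.length).flatMap
          (fun k => if bar l (k + 1) + L ≤ (k : Int) then [(k : Int) + 1] else []) := by
  intro t
  induction t with
  | nil =>
    intro m _ last barrier acc _ _
    simp [PySem.List.enumerate_nil]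
  | cons x t ih =>
    intro m hdrop last barrier acc hlast hbar
    have hm : m < l.length := by
      by_contra hge
      push Not at hge
      rw [List.drop_eq_nil_of_le hge] at hdrop
      simp at hdrop
    have hgd : l.getD m ' ' = l[m] := List.getD_eq_getElem l ' ' hm
    have hx := List.drop_eq_getElem_cons hm
    rw [hdrop] at hx
    have hx1 : x = l[m] := by injection hx
    have hx2 : t = l.drop (m + 1) := by injection hx
    rw [PySem.List.enumerate_cons, List.foldl_cons]
    have hmax : (if lastIdx l m (l.getD m ' ') > bar l m then lastIdx l m (l.getD m ' ') else bar l m)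
        = bar l (m + 1) := by
      simp only [bar]
      split <;> omega
    have step_eq : bstep L (last, barrier, acc) ((m : Int), x)
        = (last.insert x (m : Int), bar l (m + 1),
           if bar l (m + 1) + L ≤ (m : Int) then acc ++ [(m : Int) + 1] else acc) := by
      simp only [bstep, hx1, ← hgd]
      simp only [hlast (l.getD m ' '), hbar, hmax]
      refine congrArg (fun z => (last.insert (l.getD m ' ') (m : Int), bar l (m + 1), z)) ?_
      simp only [show (L ≤ (m : Int) - bar l (m + 1)) ↔ (bar l (m + 1) + L ≤ (m : Int)) from by omega]
    rw [step_eq]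
    have hlast' : ∀ c, (last.insert x (m : Int)).getD c (-1) = lastIdx l (m + 1) c := by
      intro c
      rw [PySem.Dict.getD_insert]
      simp only [lastIdx, hlast c, hx1, ← hgd]
      by_cases hc : l.getD m ' ' = c
      · rw [if_pos hc.symm, if_pos hc]
      · rw [if_neg (fun h => hc h.symm), if_neg hc]
    have henum : PySem.List.enumerate t ((m : Int) + 1) = PySem.List.enumerate t (((m + 1 : Nat)) : Int) := by
      norm_cast
    rw [henum]
    rw [ih (m + 1) hx2.symm (last.insert x (m : Int)) (bar l (m + 1))
        (if bar l (m + 1) + L ≤ (m : Int) then acc ++ [(m : Int) + 1] else acc) hlast' rfl]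
    rw [List.length_cons, List.range'_succ, List.flatMap_cons]
    split <;> simp


theorem A_eq_ref (data : String) (L : Int) (hL : 2 ≤ L) :
    find_markers data L = ref data.toList L := by
  unfold find_markers ref
  have hcongr : ∀ (acc : List Int), ∀ p ∈ PySem.List.enumerate data.toList 0,
      (if L - 1 ≤ p.1 then
        let sample := PySem.List.slice data.toList (some (p.1 - (L - 1))) (some (p.1 + 1))
        if (PySem.Set.ofList sample).length = sample.length then acc ++ [p.1 + 1] else acc
      else acc)
      = acc ++ (if bar data.toList (p.1.toNat + 1) + L ≤ p.1 then [p.1 + 1] else []) := by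
    intro acc p hp
    rw [PySem.List.mem_enumerate_iff] at hp
    obtain ⟨k, hk, rfl⟩ := hp
    simp only [zero_add, Int.toNat_natCast]
    by_cases hcond : L - 1 ≤ (k : Int)
    · rw [if_pos hcond]
      rw [PySem.List.slice_toNat data.toList (by omega) (by omega)]
      have e1 : ((k : Int) - (L - 1)).toNat = k + 1 - L.toNat := by omega
      have e2 : ((k : Int) + 1).toNat - ((k : Int) - (L - 1)).toNat = L.toNat := by omega
      rw [e2, e1]
      simp only [setlen_iff, ← window_iff data.toList L hL k hk hcond]
      split
      · rfl
      · simp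
    · rw [if_neg hcond]
      have hb := neg_one_le_bar data.toList (k + 1)
      rw [if_neg (by omega)]
      simp
  rw [PySem.List.foldl_congr_mem _ _ _ _ hcongr,
      PySem.List.foldl_append_eq_flatMap
        (fun p : Int × Char => if bar data.toList (p.1.toNat + 1) + L ≤ p.1 then [p.1 + 1] else []),
      PySem.List.enumerate_eq_map_pyRange data.toList ' ', List.flatMap_map]
  simp only [PySem.List.len, PySem.List.pyRange_zero_natCast, List.flatMap_map, Int.toNat_natCast,
    List.range_eq_range', List.nil_append]
  rfl

theorem A_trivial (data : String) (L : Int) (hL : L ≤ 1) :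
    find_markers data L = PySem.List.pyRange 1 ((data.toList.length : Int) + 1) 1 := by
  unfold find_markers
  have hcongr : ∀ (acc : List Int), ∀ p ∈ PySem.List.enumerate data.toList 0,
      (if L - 1 ≤ p.1 then
        let sample := PySem.List.slice data.toList (some (p.1 - (L - 1))) (some (p.1 + 1))
        if (PySem.Set.ofList sample).length = sample.length then acc ++ [p.1 + 1] else acc
      else acc)
      = acc ++ [p.1 + 1] := by
    intro acc p hp
    rw [PySem.List.mem_enumerate_iff] at hp
    obtain ⟨k, hk, rfl⟩ := hp
    simp only [zero_add]
    rw [if_pos (show L - 1 ≤ (k : Int) by omega)]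
    rw [PySem.List.slice_toNat data.toList (by omega) (by omega)]
    by_cases h1 : L = 1
    · subst h1
      have e1 : ((k : Int) - (1 - 1)).toNat = k := by omega
      have e2 : ((k : Int) + 1).toNat - ((k : Int) - (1 - 1)).toNat = 1 := by omega
      rw [e2, e1, List.drop_eq_getElem_cons hk, List.take_succ_cons, List.take_zero]
      rw [PySem.Set.ofList_eq_self_of_nodup _ (by simp)]
      simp
    · have e2 : ((k : Int) + 1).toNat - ((k : Int) - (L - 1)).toNat = 0 := by omega
      rw [e2, List.take_zero]
      rfl
  rw [PySem.List.foldl_congr_mem _ _ _ _ hcongr,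
      PySem.List.foldl_append_singleton_eq_map (fun p : Int × Char => p.1 + 1)]
  apply List.ext_getElem
  · simp only [List.nil_append, List.length_map, PySem.List.length_enumerate,
      PySem.List.length_pyRange_one]
    omega
  · intro k h1 h2
    simp only [List.nil_append, List.getElem_map] at h1 ⊢
    rw [PySem.List.getElem_pyRange_one]
    rw [PySem.List.getElem_enumerate data.toList 0 k (by simpa using h1)]
    push_cast
    ring

theorem B_eq_ref (data : String) (L : Int) (hL : 2 ≤ L) :
    find_markers_alt data L = ref data.toList L := by
  have hb := Bloop data.toList L data.toList 0 (by simp) PySem.Dict.empty (-1) []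
      (fun c => by rw [PySem.Dict.getD_empty]; rfl) rfl
  simp only [find_markers_alt]
  rw [if_neg (by omega)]
  unfold ref
  simpa using hb


-- ===== VERDICT (by name: the statement is the Claim_ definition above) =====
theorem find_markers_spec : Claim_equal_find_markers := by
  intro data L _
  unfold Spec_find_markers
  by_cases hL : L ≤ 1
  · rw [A_trivial data L hL]
    simp only [find_markers_alt]
    rw [if_pos hL]
  · rw [A_eq_ref data L (by omega), B_eq_ref data L (by omega)]
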